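-- pv_equiv track=rewrite | github.com/jiisloth/BitFontExpander | main.py | offsetchar
-- ===== SOURCE A (Python) =====
-- X = 0
--
-- Y = 1
--
-- def offsetchar(char, offsets, middle):
--     bitmap = []
--     for row in char:
--         binarystring = format(row, '016b')
--         bitmap.append(binarystring)
--     new = bitmap[:]
--     for y in range(len(bitmap)):
--         for x in range(len(bitmap[y])):
--             for offset in offsets:
--                 if 0 <= y + offset[Y] < len(bitmap) and 0 <= x + offset[X] < len(bitmap[y]):
--                     if bitmap[y][x] == "1":
--                         new[y+offset[Y]] = new[y+offset[Y]][:x+offset[X]] + "1" + new[y+offset[Y]][x+offset[X] + 1:]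
--             if middle == "filled":
--                 if bitmap[y][x] == "1":
--                     new[y] = new[y][:x] + "1" + new[y][x + 1:]
--     if middle == "hollow":
--         for y in range(len(bitmap)):
--             for x in range(len(bitmap[y])):
--                 if bitmap[y][x] == "1":
--                     new[y] = new[y][:x] + "0" + new[y][x + 1:]
--     for y in range(len(new)):
--         new[y] = int(new[y], 2)
--     return new
-- ===== SOURCE B (Python) =====
-- def offsetchar(char, offsets, middle):
--     # Bitwise dilation: each output row gathers, per offset, the shifted source row
--     # and ORs it in; "hollow" then clears the original bits.  Rows are 16-bit ints.
--     height = len(char)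
--     def shifted(v, dx):
--         if dx >= 16 or dx <= -16:
--             return 0
--         return v >> dx if dx >= 0 else (v << -dx) & 0xFFFF
--     out = []
--     for y in range(height):
--         acc = char[y]
--         for dx, dy in offsets:
--             src = y - dy
--             if 0 <= src < height:
--                 acc |= shifted(char[src], dx)
--         if middle == "hollow":
--             acc &= 0xFFFF ^ char[y]
--         out.append(acc)
--     return out
-- ===== Notes on version B (the rewrite author's own statement) =====
-- stated objective: faster
-- what changed: Replaces A's per-bit string surgery (format to '016b', triple loop over rows x columns x offsets rebuilding strings by slicing, then int(s,2)) with one shift-and-OR of whole 16-bit row integers per (row, offset) pair; 'hollow' becomes a single AND-NOT mask per row.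
-- outside the precondition, e.g. on offsetchar([-2], [(1, 0)], ''): A returns [-3], B returns [-1]; on offsetchar([131072], [(16, 0)], ''): A returns [131074], B returns [131072]
import Mathlib
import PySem

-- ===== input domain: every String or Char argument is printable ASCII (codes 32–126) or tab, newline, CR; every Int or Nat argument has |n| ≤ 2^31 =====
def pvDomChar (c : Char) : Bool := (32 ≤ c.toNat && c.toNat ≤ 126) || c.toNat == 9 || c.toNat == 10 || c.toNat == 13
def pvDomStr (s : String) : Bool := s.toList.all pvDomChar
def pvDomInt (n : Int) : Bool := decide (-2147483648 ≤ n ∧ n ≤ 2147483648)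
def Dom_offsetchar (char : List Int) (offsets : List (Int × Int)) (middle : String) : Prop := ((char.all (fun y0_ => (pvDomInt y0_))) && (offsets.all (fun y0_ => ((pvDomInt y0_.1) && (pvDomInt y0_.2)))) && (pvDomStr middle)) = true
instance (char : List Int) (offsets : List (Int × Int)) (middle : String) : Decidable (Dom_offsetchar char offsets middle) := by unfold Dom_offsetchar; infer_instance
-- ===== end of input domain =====

-- B replaces A's per-bit string surgery with one shift-and-OR of whole 16-bit row
-- integers per (row, offset) pair; objective: faster (constant factor ~W^2, W = 16).

-- ===== PORT A =====

-- new[y][:i] + c + new[y][i+1:]  (the string-slicing write A performs)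
def setCharAt (r : List Char) (i : Int) (c : Char) : List Char :=
  PySem.List.slice r none (some i) ++ [c] ++ PySem.List.slice r (some (i + 1)) none

-- list assignment  new[i] = v ; every use in A is guarded by 0 <= i < len(new)
def listAssign (l : List (List Char)) (i : Int) (v : List Char) : List (List Char) :=
  if 0 ≤ i then l.set i.toNat v else l

-- format(row, '016b'): the 16 binary digits of row, MSB first; exact for 0 ≤ row < 2^16,
-- which is every row admitted by Pre_offsetchar
def to016b (v : Int) : List Char :=
  (List.range 16).map (fun i => if v.toNat.testBit (15 - i) then '1' else '0')

-- int(s, 2): exact on the nonempty '0'/'1' strings that reach it under Pre_offsetchar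
def binToInt (r : List Char) : Int :=
  r.foldl (fun a c => 2 * a + (if c = '1' then 1 else 0)) 0

def offsetchar (char : List Int) (offsets : List (Int × Int)) (middle : String) : List Int :=
  let bitmap := char.map to016b
  let new1 := (List.range bitmap.length).foldl (fun new (y : Nat) =>
    (List.range (PySem.List.pyGetD bitmap (y : Int) []).length).foldl (fun new (x : Nat) =>
      let new := offsets.foldl (fun new off =>
        if 0 ≤ (y : Int) + off.2 ∧ (y : Int) + off.2 < (bitmap.length : Int)
            ∧ 0 ≤ (x : Int) + off.1
            ∧ (x : Int) + off.1 < ((PySem.List.pyGetD bitmap (y : Int) []).length : Int) then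
          if PySem.List.pyGetD (PySem.List.pyGetD bitmap (y : Int) []) (x : Int) ' ' = '1' then
            listAssign new ((y : Int) + off.2)
              (setCharAt (PySem.List.pyGetD new ((y : Int) + off.2) []) ((x : Int) + off.1) '1')
          else new
        else new) new
      if middle = "filled" then
        if PySem.List.pyGetD (PySem.List.pyGetD bitmap (y : Int) []) (x : Int) ' ' = '1' then
          listAssign new (y : Int)
            (setCharAt (PySem.List.pyGetD new (y : Int) []) (x : Int) '1')
        else new
      else new) new) bitmap
  let new2 := if middle = "hollow" then
    (List.range bitmap.length).foldl (fun new (y : Nat) =>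
      (List.range (PySem.List.pyGetD bitmap (y : Int) []).length).foldl (fun new (x : Nat) =>
        if PySem.List.pyGetD (PySem.List.pyGetD bitmap (y : Int) []) (x : Int) ' ' = '1' then
          listAssign new (y : Int)
            (setCharAt (PySem.List.pyGetD new (y : Int) []) (x : Int) '0')
        else new) new) new1
    else new1
  new2.map binToInt

-- ===== PORT B =====

-- B's helper `shifted`: the 16-bit window of v shifted right by dx (left for dx < 0)
def shifted (v : Int) (dx : Int) : Int :=
  if 16 ≤ dx ∨ dx ≤ -16 then 0
  else if 0 ≤ dx then v >>> dx.toNat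
  else PySem.Int.band (v <<< (-dx).toNat) 65535

def offsetchar_alt (char : List Int) (offsets : List (Int × Int)) (middle : String) : List Int :=
  (List.range char.length).foldl (fun out (y : Nat) =>
    let acc := offsets.foldl (fun acc off =>
      if 0 ≤ (y : Int) - off.2 ∧ (y : Int) - off.2 < (char.length : Int) then
        PySem.Int.bor acc (shifted (PySem.List.pyGetD char ((y : Int) - off.2) 0) off.1)
      else acc) (PySem.List.pyGetD char (y : Int) 0)
    let acc := if middle = "hollow" then
        PySem.Int.band acc (PySem.Int.bxor 65535 (PySem.List.pyGetD char (y : Int) 0))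
      else acc
    out ++ [acc]) []

-- ===== PRECONDITION & SPEC =====

-- Pre_ restricts rows to the 16-bit bitmaps the program is about: outside [0, 2^16) A's
-- format(row,'016b') yields a sign character or more than 16 columns and the string
-- surgery / bound checks act on those accidental shapes, a pure artefact of the
-- string representation.
def Pre_offsetchar (char : List Int) (offsets : List (Int × Int)) (middle : String) : Prop :=
  ∀ v ∈ char, 0 ≤ v ∧ v < 65536
instance (char : List Int) (offsets : List (Int × Int)) (middle : String) : Decidable (Pre_offsetchar char offsets middle) := by unfold Pre_offsetchar; infer_instance

def pvWitness_offsetchar : List Int × (List (Int × Int)) × String :=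
  ([1, 32768, 5], [(1, 0), (-1, 1), (0, -1)], "hollow")

def Spec_offsetchar (char : List Int) (offsets : List (Int × Int)) (middle : String) (out : List Int) : Prop := out = offsetchar_alt char offsets middle
instance (char : List Int) (offsets : List (Int × Int)) (middle : String) (out : List Int) : Decidable (Spec_offsetchar char offsets middle out) := by unfold Spec_offsetchar; infer_instance

-- ===== CLAIM (what is proved, stated in full; the proofs are below) =====
def Claim_equal_offsetchar : Prop := ∀ (char : List Int) (offsets : List (Int × Int)) (middle : String), Dom_offsetchar char offsets middle → Pre_offsetchar char offsets middle → Spec_offsetchar char offsets middle (offsetchar char offsets middle)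

-- ===== LEMMAS AND PROOFS =====

-- ---------- Nat-level model of A (bit p of row j; char column x holds bit 15-x) ----------

def rowOf (m : Nat) : List Char :=
  (List.range 16).map (fun i => if m.testBit (15 - i) then '1' else '0')

def orAt (M : List Nat) (t : Nat × Nat) : List Nat :=
  M.set t.1 (M.getD t.1 0 ||| 2 ^ t.2)

def andAt (M : List Nat) (t : Nat × Nat) : List Nat :=
  M.set t.1 (M.getD t.1 0 &&& (65535 ^^^ 2 ^ t.2))

-- the (target row, bit) writes performed by A's offsets loop at source cell (y, x)
def writesOfs (H : Nat) (offs : List (Int × Int)) (m : Nat) (y x : Nat) : List (Nat × Nat) :=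
  offs.filterMap (fun off =>
    if (0 ≤ (y:Int) + off.2 ∧ (y:Int) + off.2 < (H:Int) ∧ 0 ≤ (x:Int) + off.1 ∧ (x:Int) + off.1 < 16)
        ∧ m.testBit (15 - x) = true
    then some (((y:Int) + off.2).toNat, 15 - ((x:Int) + off.1).toNat) else none)

def filledW (filled : Bool) (m : Nat) (y x : Nat) : List (Nat × Nat) :=
  if filled && m.testBit (15 - x) then [(y, 15 - x)] else []

def hollowW (m : Nat) (y x : Nat) : List (Nat × Nat) :=
  if m.testBit (15 - x) then [(y, 15 - x)] else []

def TW (M0 : List Nat) (offs : List (Int × Int)) (filled : Bool) : List (Nat × Nat) :=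
  (List.range M0.length).flatMap (fun y => (List.range 16).flatMap (fun x =>
    writesOfs M0.length offs (M0.getD y 0) y x ++ filledW filled (M0.getD y 0) y x))

def TH (M0 : List Nat) : List (Nat × Nat) :=
  (List.range M0.length).flatMap (fun y => (List.range 16).flatMap (fun x =>
    hollowW (M0.getD y 0) y x))

def phase1 (M0 : List Nat) (offs : List (Int × Int)) (middle : String) : List Nat :=
  (TW M0 offs (middle == "filled")).foldl orAt M0

def phase2 (M0 : List Nat) (offs : List (Int × Int)) (middle : String) : List Nat :=
  if middle = "hollow" then (TH M0).foldl andAt (phase1 M0 offs middle) else phase1 M0 offs middle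

-- ---------- Nat-level model of B ----------

def shiftN (m : Nat) (dx : Int) : Nat :=
  if 16 ≤ dx ∨ dx ≤ -16 then 0
  else if 0 ≤ dx then m >>> dx.toNat
  else (m <<< (-dx).toNat) &&& 65535

def bRowN (M0 : List Nat) (offs : List (Int × Int)) (y : Nat) : Nat :=
  offs.foldl (fun acc off =>
    if 0 ≤ (y:Int) - off.2 ∧ (y:Int) - off.2 < (M0.length:Int) then
      acc ||| shiftN (M0.getD ((y:Int) - off.2).toNat 0) off.1
    else acc) (M0.getD y 0)

def bValN (M0 : List Nat) (offs : List (Int × Int)) (middle : String) (y : Nat) : Nat :=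
  if middle = "hollow" then bRowN M0 offs y &&& (65535 ^^^ M0.getD y 0) else bRowN M0 offs y

-- ---------- small facts ----------

theorem hi_bit_false {m i : Nat} (h : m < 65536) (hi : 16 ≤ i) : m.testBit i = false :=
  Nat.testBit_lt_two_pow (lt_of_lt_of_le h
    (by calc (65536:Nat) = 2 ^ 16 := by norm_num
             _ ≤ 2 ^ i := Nat.pow_le_pow_right (by norm_num) hi))

theorem rowOf_length (m : Nat) : (rowOf m).length = 16 := by simp [rowOf]

theorem getD_set_eq (M : List Nat) (k j v : Nat) (h : k < M.length) (hkj : k = j) :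
    (M.set k v).getD j 0 = v := by
  subst hkj; simp [List.getD_eq_getElem?_getD, h]

theorem getD_set_ne (M : List Nat) (k j v : Nat) (hkj : k ≠ j) :
    (M.set k v).getD j 0 = M.getD j 0 := by
  simp [List.getD_eq_getElem?_getD, List.getElem?_set_ne hkj]

theorem getD_map_rowOf (M : List Nat) (j : Nat) (hj : j < M.length) :
    (M.map rowOf).getD j [] = rowOf (M.getD j 0) := by
  rw [List.getD_eq_getElem _ _ (by simpa), List.getElem_map, List.getD_eq_getElem _ _ hj]

theorem rowOf_getD (m x : Nat) (hx : x < 16) :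
    (rowOf m).getD x ' ' = if m.testBit (15 - x) then '1' else '0' := by
  rw [rowOf, List.getD_eq_getElem _ _ (by simpa), List.getElem_map, List.getElem_range]

theorem rowOf_read (m x : Nat) (hx : x < 16) :
    ((rowOf m).getD x ' ' = '1') ↔ m.testBit (15 - x) = true := by
  rw [rowOf_getD m x hx]; split <;> simp_all

theorem setCharAt_rowOf (m x : Nat) (hx : x < 16) (c : Char) :
    setCharAt (rowOf m) (x : Int) c = (rowOf m).set x c := by
  rw [setCharAt, PySem.List.slice_to_natCast]
  have h1 : (x:Int) + 1 = ((x+1 : Nat) : Int) := by push_cast; ring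
  rw [h1, PySem.List.slice_from_natCast,
      List.set_eq_take_cons_drop c (by simp [rowOf]; omega)]
  simp

theorem set_rowOf_one (m x : Nat) (hx : x < 16) :
    (rowOf m).set x '1' = rowOf (m ||| 2 ^ (15 - x)) := by
  apply List.ext_getElem (by simp [rowOf])
  intro i h1 h2
  have hi : i < 16 := by simpa [rowOf] using h2
  rw [List.getElem_set]
  simp only [rowOf, List.getElem_map, List.getElem_range,
    Nat.testBit_lor, Nat.testBit_two_pow]
  rcases eq_or_ne x i with h | h
  · subst h; simp
  · have : ¬(15 - x = 15 - i) := by omega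
    simp [h, this]

theorem set_rowOf_zero (m x : Nat) (hx : x < 16) :
    (rowOf m).set x '0' = rowOf (m &&& (65535 ^^^ 2 ^ (15 - x))) := by
  apply List.ext_getElem (by simp [rowOf])
  intro i h1 h2
  have hi : i < 16 := by simpa [rowOf] using h2
  rw [List.getElem_set]
  have h65535 : (65535 : Nat) = 2 ^ 16 - 1 := by norm_num
  simp only [rowOf, List.getElem_map, List.getElem_range, Nat.testBit_land,
    Nat.testBit_xor, h65535, Nat.testBit_two_pow_sub_one, Nat.testBit_two_pow]
  rcases eq_or_ne x i with h | h
  · subst h; simp; omega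
  · have hne : ¬(15 - x = 15 - i) := by omega
    have hlt : 15 - i < 16 := by omega
    simp [h, hne, hlt]

def bitsRow (n m : Nat) : List Char :=
  (List.range n).map (fun i => if m.testBit (n - 1 - i) then '1' else '0')

theorem bitsRow_succ (n m : Nat) :
    bitsRow (n+1) m = (if m.testBit n then '1' else '0') :: bitsRow n (m % 2 ^ n) := by
  rw [bitsRow, List.range_succ_eq_map, List.map_cons]
  refine List.cons_eq_cons.mpr ⟨by norm_num, ?_⟩
  · rw [List.map_map, bitsRow]
    apply List.map_congr_left
    intro i hi
    have hi' : i < n := List.mem_range.mp hi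
    have h1 : n - (i + 1) = n - 1 - i := by omega
    have h2 : (m % 2 ^ n).testBit (n - 1 - i) = m.testBit (n - 1 - i) := by
      rw [Nat.testBit_mod_two_pow]; simp [Nat.lt_of_lt_of_le (by omega : n - 1 - i < n) le_rfl]
    simp [Function.comp, h1, h2]

theorem foldl_bitsRow (n : Nat) : ∀ (m : Nat) (a : Int), m < 2 ^ n →
    (bitsRow n m).foldl (fun a c => 2 * a + (if c = '1' then 1 else 0)) a = a * 2 ^ n + (m : Int) := by
  induction n with
  | zero => intro m a hm; interval_cases m; simp [bitsRow]
  | succ n ih =>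
    intro m a hm
    rw [bitsRow_succ, List.foldl_cons, ih _ _ (Nat.mod_lt _ (Nat.pow_pos (by norm_num : 0 < 2)))]
    have hq : m / 2 ^ n < 2 := Nat.div_lt_of_lt_mul (by rw [← pow_succ]; exact hm)
    have h01 : m / 2 ^ n = 0 ∨ m / 2 ^ n = 1 := by
      generalize h : m / 2 ^ n = q at hq ⊢; omega
    have htb : m.testBit n = decide (m / 2 ^ n % 2 = 1) := Nat.testBit_eq_decide_div_mod_eq
    have hmeq : m = 2 ^ n * (m / 2 ^ n) + m % 2 ^ n := (Nat.div_add_mod m (2 ^ n)).symm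
    have hmInt : (m : Int) = 2 ^ n * ((m / 2 ^ n : Nat) : Int) + ((m % 2 ^ n : Nat) : Int) := by
      exact_mod_cast congrArg (fun k : Nat => (k : Int)) hmeq
    rcases h01 with h | h
    · rw [htb, h]
      have hb : (if (decide ((0:Nat) % 2 = 1)) = true then '1' else '0') = '0' := by decide
      rw [hb, pow_succ, hmInt, h]
      simp only [show (('0':Char) = '1') = False from by decide, if_false, Nat.cast_zero]
      ring
    · rw [htb, h]
      have hb : (if (decide ((1:Nat) % 2 = 1)) = true then '1' else '0') = '1' := by decide
      rw [hb, pow_succ, hmInt, h]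
      simp only [show (('1':Char) = '1') = True from by decide, if_true, Nat.cast_one]
      ring


theorem rowOf_eq_bitsRow (m : Nat) : rowOf m = bitsRow 16 m := by
  simp [rowOf, bitsRow]

theorem binToInt_rowOf (m : Nat) (hm : m < 65536) : binToInt (rowOf m) = (m : Int) := by
  rw [binToInt, rowOf_eq_bitsRow]
  have := foldl_bitsRow 16 m 0 (by norm_num at hm ⊢; exact hm)
  simpa using this

-- ---------- scatter characterizations ----------

theorem foldl_orAt_length (T : List (Nat × Nat)) (M : List Nat) :
    (T.foldl orAt M).length = M.length := by
  induction T generalizing M with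
  | nil => rfl
  | cons t T ih => simp [List.foldl_cons, ih, orAt]

theorem foldl_andAt_length (T : List (Nat × Nat)) (M : List Nat) :
    (T.foldl andAt M).length = M.length := by
  induction T generalizing M with
  | nil => rfl
  | cons t T ih => simp [List.foldl_cons, ih, andAt]

theorem or_fold_testBit (T : List (Nat × Nat)) : ∀ (M : List Nat),
    (∀ t ∈ T, t.1 < M.length) → ∀ (j p : Nat),
    ((T.foldl orAt M).getD j 0).testBit p = true ↔
      ((M.getD j 0).testBit p = true ∨ (j, p) ∈ T) := by
  induction T with
  | nil => simp
  | cons t T ih =>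
    intro M hT j p
    rw [List.foldl_cons]
    have ht1 : t.1 < M.length := hT t (by simp)
    rw [ih (orAt M t) (by intro u hu; simpa [orAt] using hT u (by simp [hu]))]
    rcases eq_or_ne t.1 j with h | h
    · rw [orAt, getD_set_eq _ _ _ _ ht1 h]
      subst h
      simp only [Nat.testBit_lor, Nat.testBit_two_pow, List.mem_cons]
      constructor
      · rintro (hb | hm)
        · rcases Bool.or_eq_true_iff.mp hb with hb | hb
          · exact Or.inl hb
          · exact Or.inr (Or.inl (by cases t; simp_all))
        · exact Or.inr (Or.inr hm)
      · rintro (hb | (hm | hm))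
        · exact Or.inl (by rw [Bool.or_eq_true]; exact Or.inl hb)
        · exact Or.inl (by rw [Bool.or_eq_true]; exact Or.inr (by rw [← hm]; simp))
        · exact Or.inr hm
    · rw [orAt, getD_set_ne _ _ _ _ h]
      simp only [List.mem_cons]
      constructor
      · rintro (hb | hm)
        · exact Or.inl hb
        · exact Or.inr (Or.inr hm)
      · rintro (hb | (hm | hm))
        · exact Or.inl hb
        · exact absurd (congrArg Prod.fst hm).symm h
        · exact Or.inr hm

theorem and_fold_testBit (T : List (Nat × Nat)) : ∀ (M : List Nat),
    (∀ t ∈ T, t.1 < M.length ∧ t.2 < 16) → ∀ (j p : Nat),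
    ((T.foldl andAt M).getD j 0).testBit p = true ↔
      ((M.getD j 0).testBit p = true ∧ ∀ q, (j, q) ∈ T → p ≠ q ∧ p < 16) := by
  induction T with
  | nil => simp
  | cons t T ih =>
    obtain ⟨k, q0⟩ := t
    intro M hT j p
    rw [List.foldl_cons]
    have ht1 : k < M.length := (hT (k, q0) (by simp)).1
    have ht2 : q0 < 16 := (hT (k, q0) (by simp)).2
    rw [ih (andAt M (k, q0)) (by intro u hu; simpa [andAt] using hT u (by simp [hu]))]
    have h65535 : (65535 : Nat) = 2 ^ 16 - 1 := by norm_num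
    rcases eq_or_ne k j with h | h
    · subst h
      rw [andAt, getD_set_eq _ _ _ _ ht1 rfl]
      simp only [Nat.testBit_land, Nat.testBit_xor, h65535, Nat.testBit_two_pow_sub_one,
        Nat.testBit_two_pow, List.mem_cons, Bool.and_eq_true, bne_iff_ne, ne_eq,
        decide_eq_decide, Prod.mk.injEq, true_and]
      constructor
      · rintro ⟨⟨hb, hx⟩, hall⟩
        have hp16 : p < 16 ∧ p ≠ q0 := by
          by_cases hp : p < 16
          · refine ⟨hp, fun hpq => hx ⟨fun _ => hpq.symm, fun _ => hp⟩⟩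
          · have hq : q0 = p := by
              by_contra hq; exact hx ⟨fun hh => absurd hh hp, fun hh => absurd hh hq⟩
            omega
        refine ⟨hb, ?_⟩
        rintro q (rfl | hm)
        · exact ⟨hp16.2, hp16.1⟩
        · exact hall q hm
      · rintro ⟨hb, hall⟩
        have h1 := hall q0 (Or.inl rfl)
        refine ⟨⟨hb, fun hiff => ?_⟩, fun q hm => hall q (Or.inr hm)⟩
        exact h1.1 (hiff.mp h1.2).symm
    · rw [andAt, getD_set_ne _ _ _ _ h]
      constructor
      · rintro ⟨hb, hall⟩
        refine ⟨hb, ?_⟩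
        intro q hm
        rcases List.mem_cons.mp hm with hm | hm
        · exact absurd (congrArg Prod.fst hm).symm h
        · exact hall q hm
      · rintro ⟨hb, hall⟩
        exact ⟨hb, fun q hm => hall q (List.mem_cons_of_mem _ hm)⟩

-- ---------- B-side characterizations ----------

theorem shiftN_testBit (m : Nat) (dx : Int) (p : Nat) (hm : m < 65536) :
    ((shiftN m dx).testBit p = true) ↔
      (p < 16 ∧ 0 ≤ (p:Int) + dx ∧ (p:Int) + dx < 16 ∧ m.testBit ((p:Int) + dx).toNat = true) := by
  rw [shiftN]
  split_ifs with h1 h2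
  · simp only [Nat.zero_testBit, Bool.false_eq_true, false_iff]
    rintro ⟨hp, hge, hlt, _⟩; omega
  · rw [Nat.testBit_shiftRight]
    constructor
    · intro hb
      have hlt : p + dx.toNat < 16 := by
        by_contra hge
        rw [hi_bit_false hm (by omega)] at hb; exact absurd hb (by simp)
      refine ⟨by omega, by omega, by omega, ?_⟩
      have : ((p:Int) + dx).toNat = dx.toNat + p := by omega
      rw [this]; exact hb
    · rintro ⟨hp, hge, hlt, hb⟩
      have : ((p:Int) + dx).toNat = dx.toNat + p := by omega
      rw [this] at hb; exact hb
  · rw [Nat.testBit_land, Nat.testBit_shiftLeft,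
      show (65535:Nat) = 2^16 - 1 from by norm_num, Nat.testBit_two_pow_sub_one]
    constructor
    · intro hb
      simp only [Bool.and_eq_true, decide_eq_true_eq] at hb
      obtain ⟨⟨hk, hbit⟩, hp⟩ := hb
      refine ⟨hp, by omega, by omega, ?_⟩
      have : ((p:Int) + dx).toNat = p - (-dx).toNat := by omega
      rw [this]; exact hbit
    · rintro ⟨hp, hge, hlt, hb⟩
      simp only [Bool.and_eq_true, decide_eq_true_eq]
      have : p - (-dx).toNat = ((p:Int) + dx).toNat := by omega
      exact ⟨⟨by omega, by rw [this]; exact hb⟩, hp⟩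

theorem bRowN_testBit_aux (M0 : List Nat) (offs : List (Int × Int)) (y p : Nat) :
    ∀ (a : Nat),
    ((offs.foldl (fun acc off =>
        if 0 ≤ (y:Int) - off.2 ∧ (y:Int) - off.2 < (M0.length:Int) then
          acc ||| shiftN (M0.getD ((y:Int) - off.2).toNat 0) off.1
        else acc) a).testBit p = true) ↔
      (a.testBit p = true ∨ ∃ off ∈ offs,
        (0 ≤ (y:Int) - off.2 ∧ (y:Int) - off.2 < (M0.length:Int)) ∧
        (shiftN (M0.getD ((y:Int) - off.2).toNat 0) off.1).testBit p = true) := by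
  induction offs with
  | nil => simp
  | cons off offs ih =>
    intro a
    rw [List.foldl_cons]
    split_ifs with hc
    · rw [ih]
      simp only [Nat.testBit_lor, Bool.or_eq_true, List.mem_cons]
      constructor
      · rintro ((hb | hb) | ⟨o, ho, hc2, hb⟩)
        · exact Or.inl hb
        · exact Or.inr ⟨off, Or.inl rfl, hc, hb⟩
        · exact Or.inr ⟨o, Or.inr ho, hc2, hb⟩
      · rintro (hb | ⟨o, ho | ho, hc2, hb⟩)
        · exact Or.inl (Or.inl hb)
        · subst ho; exact Or.inl (Or.inr hb)
        · exact Or.inr ⟨o, ho, hc2, hb⟩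
    · rw [ih]
      simp only [List.mem_cons]
      constructor
      · rintro (hb | ⟨o, ho, hc2, hb⟩)
        · exact Or.inl hb
        · exact Or.inr ⟨o, Or.inr ho, hc2, hb⟩
      · rintro (hb | ⟨o, ho | ho, hc2, hb⟩)
        · exact Or.inl hb
        · subst ho; exact absurd hc2 hc
        · exact Or.inr ⟨o, ho, hc2, hb⟩

theorem bRowN_testBit (M0 : List Nat) (offs : List (Int × Int)) (y p : Nat) :
    ((bRowN M0 offs y).testBit p = true) ↔
      ((M0.getD y 0).testBit p = true ∨ ∃ off ∈ offs,
        (0 ≤ (y:Int) - off.2 ∧ (y:Int) - off.2 < (M0.length:Int)) ∧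
        (shiftN (M0.getD ((y:Int) - off.2).toNat 0) off.1).testBit p = true) :=
  bRowN_testBit_aux M0 offs y p (M0.getD y 0)

-- ---------- membership in the write lists ----------

theorem mem_TW (M0 : List Nat) (offs : List (Int × Int)) (filled : Bool) (j p : Nat) :
    ((j, p) ∈ TW M0 offs filled) ↔
      ((∃ y : Nat, y < M0.length ∧ ∃ x : Nat, x < 16 ∧ ∃ off ∈ offs,
          (0 ≤ (y:Int) + off.2 ∧ (y:Int) + off.2 < (M0.length:Int) ∧
           0 ≤ (x:Int) + off.1 ∧ (x:Int) + off.1 < 16) ∧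
          (M0.getD y 0).testBit (15 - x) = true ∧
          ((y:Int) + off.2).toNat = j ∧ 15 - ((x:Int) + off.1).toNat = p) ∨
        (filled = true ∧ j < M0.length ∧ ∃ x : Nat, x < 16 ∧
          (M0.getD j 0).testBit (15 - x) = true ∧ 15 - x = p)) := by
  simp only [TW, List.mem_flatMap, List.mem_range, List.mem_append]
  constructor
  · rintro ⟨y, hy, x, hx, hm | hm⟩
    · rw [writesOfs, List.mem_filterMap] at hm
      obtain ⟨off, hoff, heq⟩ := hm
      split_ifs at heq with hc
      · obtain ⟨hc1, hb⟩ := hc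
        rcases Option.some_inj.mp heq with h
        exact Or.inl ⟨y, hy, x, hx, off, hoff, hc1, hb,
          congrArg Prod.fst h, congrArg Prod.snd h⟩
    · rw [filledW] at hm
      split_ifs at hm with hb
      · simp only [Bool.and_eq_true] at hb
        rcases List.mem_singleton.mp hm with h
        obtain ⟨rfl, rfl⟩ : j = y ∧ p = 15 - x :=
          ⟨congrArg Prod.fst h, congrArg Prod.snd h⟩
        exact Or.inr ⟨hb.1, hy, x, hx, hb.2, rfl⟩
      · simp at hm
  · rintro (⟨y, hy, x, hx, off, hoff, hc1, hb, hj, hp⟩ | ⟨hf, hj, x, hx, hb, hp⟩)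
    · refine ⟨y, hy, x, hx, Or.inl ?_⟩
      rw [writesOfs, List.mem_filterMap]
      exact ⟨off, hoff, by rw [if_pos ⟨hc1, hb⟩, hj, hp]⟩
    · refine ⟨j, hj, x, hx, Or.inr ?_⟩
      rw [List.getD_eq_getElem?_getD] at hb
      rw [filledW, if_pos (by simp [hf, hb])]
      simp [hp]

theorem mem_TH (M0 : List Nat) (j p : Nat) :
    ((j, p) ∈ TH M0) ↔
      (j < M0.length ∧ ∃ x : Nat, x < 16 ∧ (M0.getD j 0).testBit (15 - x) = true ∧ 15 - x = p) := by
  simp only [TH, hollowW, List.mem_flatMap, List.mem_range]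
  constructor
  · rintro ⟨y, hy, x, hx, hm⟩
    split_ifs at hm with hb
    · rcases List.mem_singleton.mp hm with h
      obtain ⟨rfl, rfl⟩ : j = y ∧ p = 15 - x := by
        exact ⟨congrArg Prod.fst h, congrArg Prod.snd h⟩
      exact ⟨hy, x, hx, hb, rfl⟩
    · simp at hm
  · rintro ⟨hj, x, hx, hb, rfl⟩
    rw [List.getD_eq_getElem?_getD] at hb
    exact ⟨j, hj, x, hx, by simp [hb]⟩

theorem TW_bound (M0 : List Nat) (offs : List (Int × Int)) (filled : Bool) :
    ∀ t ∈ TW M0 offs filled, t.1 < M0.length ∧ t.2 < 16 := by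
  intro t ht
  obtain ⟨j, p⟩ := t
  rcases (mem_TW M0 offs filled j p).mp ht with
    ⟨y, hy, x, hx, off, hoff, hc1, hb, hj, hp⟩ | ⟨hf, hj, x, hx, hb, hp⟩
  · constructor
    · omega
    · omega
  · exact ⟨hj, by omega⟩

theorem TH_bound (M0 : List Nat) : ∀ t ∈ TH M0, t.1 < M0.length ∧ t.2 < 16 := by
  intro t ht
  obtain ⟨j, p⟩ := t
  rcases (mem_TH M0 j p).mp ht with ⟨hj, x, hx, _, hp⟩
  exact ⟨hj, by omega⟩

-- ---------- the core Nat-level equality ----------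

theorem phase1_eq_bRowN (M0 : List Nat) (offs : List (Int × Int)) (middle : String)
    (hM0 : ∀ m ∈ M0, m < 65536) (j : Nat) (hj : j < M0.length) :
    (phase1 M0 offs middle).getD j 0 = bRowN M0 offs j := by
  have hTWb := TW_bound M0 offs (middle == "filled")
  have hmem : ∀ k, k < M0.length → M0.getD k 0 < 65536 := by
    intro k hk
    rw [List.getD_eq_getElem M0 0 hk]
    exact hM0 _ (List.getElem_mem hk)
  apply Nat.eq_of_testBit_eq
  intro p
  rw [Bool.eq_iff_iff]
  rw [phase1, or_fold_testBit _ _ (fun t ht => (hTWb t ht).1) j p,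
      bRowN_testBit M0 offs j p]
  constructor
  · rintro (hb | hm)
    · exact Or.inl hb
    · rcases (mem_TW M0 offs _ j p).mp hm with
        ⟨y, hy, x, hx, off, hoff, ⟨c1, c2, c3, c4⟩, hb, hjeq, hpeq⟩ | ⟨_, _, x, hx, hb, hpeq⟩
      · refine Or.inr ⟨off, hoff, ⟨by omega, by omega⟩, ?_⟩
        have hsrc : ((j:Int) - off.2).toNat = y := by omega
        rw [hsrc, shiftN_testBit _ _ _ (hmem y hy)]
        have h15 : ((p:Int) + off.1).toNat = 15 - x := by omega
        refine ⟨by omega, by omega, by omega, ?_⟩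
        rw [h15]; exact hb
      · exact Or.inl (by rw [← hpeq] at *; exact hb)
  · rintro (hb | ⟨off, hoff, ⟨c1, c2⟩, hsb⟩)
    · exact Or.inl hb
    · have hsrcmem : M0.getD ((j:Int) - off.2).toNat 0 < 65536 :=
        hmem _ (by omega)
      rw [shiftN_testBit _ _ _ hsrcmem] at hsb
      obtain ⟨hp16, hge, hlt, hbit⟩ := hsb
      refine Or.inr ((mem_TW M0 offs _ j p).mpr (Or.inl ?_))
      refine ⟨((j:Int) - off.2).toNat, by omega,
              15 - ((p:Int) + off.1).toNat, by omega, off, hoff,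
              ⟨by omega, by omega, by omega, by omega⟩, ?_, by omega, by omega⟩
      have h15 : 15 - (15 - ((p:Int) + off.1).toNat) = ((p:Int) + off.1).toNat := by omega
      rw [h15]; exact hbit

theorem core_eq (M0 : List Nat) (offs : List (Int × Int)) (middle : String)
    (hM0 : ∀ m ∈ M0, m < 65536) (j : Nat) (hj : j < M0.length) :
    (phase2 M0 offs middle).getD j 0 = bValN M0 offs middle j := by
  have hmem : ∀ k, k < M0.length → M0.getD k 0 < 65536 := by
    intro k hk
    rw [List.getD_eq_getElem M0 0 hk]
    exact hM0 _ (List.getElem_mem hk)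
  have hbRow_hi : ∀ p, 16 ≤ p → (bRowN M0 offs j).testBit p = false := by
    intro p hp
    rw [← Bool.not_eq_true, bRowN_testBit M0 offs j p]
    rintro (hb | ⟨off, hoff, ⟨c1, c2⟩, hsb⟩)
    · rw [hi_bit_false (hmem j hj) hp] at hb; exact absurd hb (by simp)
    · rw [shiftN_testBit _ _ _ (hmem _ (by omega))] at hsb
      omega
  rw [phase2, bValN]
  by_cases hmid : middle = "hollow"
  · rw [if_pos hmid, if_pos hmid]
    have hlen : (phase1 M0 offs middle).length = M0.length := foldl_orAt_length _ _
    have hbnds : ∀ t ∈ TH M0, t.1 < (phase1 M0 offs middle).length ∧ t.2 < 16 := by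
      intro t ht
      exact ⟨by rw [hlen]; exact (TH_bound M0 t ht).1, (TH_bound M0 t ht).2⟩
    apply Nat.eq_of_testBit_eq
    intro p
    rw [Bool.eq_iff_iff, and_fold_testBit _ _ hbnds j p,
        phase1_eq_bRowN M0 offs middle hM0 j hj]
    rw [Nat.testBit_land, Nat.testBit_xor,
        show (65535:Nat) = 2 ^ 16 - 1 from by norm_num,
        Nat.testBit_two_pow_sub_one]
    by_cases hp : p < 16
    · constructor
      · rintro ⟨hb, hall⟩
        rw [hb]
        have hnb : (M0.getD j 0).testBit p = false := by
          rw [← Bool.not_eq_true]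
          intro hset
          have hmemTH : (j, p) ∈ TH M0 :=
            (mem_TH M0 j p).mpr ⟨hj, 15 - p, by omega, by rw [show 15 - (15 - p) = p from by omega]; exact hset, by omega⟩
          exact absurd rfl (hall p hmemTH).1
        rw [hnb]
        simp [hp]
      · intro hb
        simp only [Bool.and_eq_true, bne_iff_ne, ne_eq] at hb
        obtain ⟨hb1, hb2⟩ := hb
        have hnb : (M0.getD j 0).testBit p = false := by
          by_contra hset
          rw [Bool.not_eq_false] at hset
          exact hb2 (by rw [hset]; simp [hp])
        refine ⟨hb1, ?_⟩
        intro q hq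
        rcases (mem_TH M0 j q).mp hq with ⟨_, x, hx, hbit, hxq⟩
        refine ⟨?_, hp⟩
        intro hpq
        rw [hxq, ← hpq] at hbit
        rw [hbit] at hnb
        exact absurd hnb (by simp)
    · have h16 : 16 ≤ p := by omega
      constructor
      · rintro ⟨hb, _⟩
        rw [hbRow_hi p h16] at hb
        exact absurd hb (by simp)
      · intro hb
        simp only [Bool.and_eq_true] at hb
        rw [hbRow_hi p h16] at hb
        exact absurd hb.1 (by simp)
  · rw [if_neg hmid, if_neg hmid]
    exact phase1_eq_bRowN M0 offs middle hM0 j hj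

theorem bValN_lt (M0 : List Nat) (offs : List (Int × Int)) (middle : String)
    (hM0 : ∀ m ∈ M0, m < 65536) (j : Nat) (hj : j < M0.length) :
    bValN M0 offs middle j < 65536 := by
  have hmem : ∀ k, k < M0.length → M0.getD k 0 < 65536 := by
    intro k hk
    rw [List.getD_eq_getElem M0 0 hk]
    exact hM0 _ (List.getElem_mem hk)
  have hbRow_hi : ∀ p, 16 ≤ p → (bRowN M0 offs j).testBit p = false := by
    intro p hp
    rw [← Bool.not_eq_true, bRowN_testBit M0 offs j p]
    rintro (hb | ⟨off, hoff, ⟨c1, c2⟩, hsb⟩)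
    · rw [hi_bit_false (hmem j hj) hp] at hb; exact absurd hb (by simp)
    · rw [shiftN_testBit _ _ _ (hmem _ (by omega))] at hsb
      omega
  have : bValN M0 offs middle j < 2 ^ 16 := by
    apply Nat.lt_pow_two_of_testBit
    intro i hi
    rw [bValN]
    split_ifs with h
    · rw [Nat.testBit_land, hbRow_hi i hi]; simp
    · exact hbRow_hi i hi
  omega

-- ---------- simulation: A's string program computes the Nat model ----------

theorem pyGetD_map_rowOf (M : List Nat) (i : Int) (h0 : 0 ≤ i) (hi : i.toNat < M.length) :
    PySem.List.pyGetD (M.map rowOf) i [] = rowOf (M.getD i.toNat 0) := by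
  rw [PySem.List.pyGetD_of_nonneg _ _ h0]
  exact getD_map_rowOf M i.toNat (by simpa using hi)

theorem write_one (M : List Nat) (i xx : Int) (h0 : 0 ≤ i) (hi : i.toNat < M.length)
    (hx0 : 0 ≤ xx) (hxx : xx.toNat < 16) :
    listAssign (M.map rowOf) i (setCharAt (PySem.List.pyGetD (M.map rowOf) i []) xx '1')
      = (orAt M (i.toNat, 15 - xx.toNat)).map rowOf := by
  rw [pyGetD_map_rowOf M i h0 hi]
  rw [show xx = ((xx.toNat : Nat) : Int) from by omega]
  rw [setCharAt_rowOf _ _ hxx, set_rowOf_one _ _ hxx]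
  rw [listAssign, if_pos h0, orAt, List.map_set]
  have hmax : max xx 0 = xx := by omega
  simp [hmax]

theorem write_zero (M : List Nat) (i xx : Int) (h0 : 0 ≤ i) (hi : i.toNat < M.length)
    (hx0 : 0 ≤ xx) (hxx : xx.toNat < 16) :
    listAssign (M.map rowOf) i (setCharAt (PySem.List.pyGetD (M.map rowOf) i []) xx '0')
      = (andAt M (i.toNat, 15 - xx.toNat)).map rowOf := by
  rw [pyGetD_map_rowOf M i h0 hi]
  rw [show xx = ((xx.toNat : Nat) : Int) from by omega]
  rw [setCharAt_rowOf _ _ hxx, set_rowOf_zero _ _ hxx]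
  rw [listAssign, if_pos h0, andAt, List.map_set]
  have hmax : max xx 0 = xx := by omega
  simp [hmax]

theorem writesOfs_cons (H : Nat) (off : Int × Int) (offs : List (Int × Int)) (m y x : Nat) :
    writesOfs H (off :: offs) m y x =
      if (0 ≤ (y:Int) + off.2 ∧ (y:Int) + off.2 < (H:Int) ∧ 0 ≤ (x:Int) + off.1 ∧ (x:Int) + off.1 < 16)
          ∧ m.testBit (15 - x) = true then
        (((y:Int) + off.2).toNat, 15 - ((x:Int) + off.1).toNat) :: writesOfs H offs m y x
      else writesOfs H offs m y x := by
  by_cases h : (0 ≤ (y:Int) + off.2 ∧ (y:Int) + off.2 < (H:Int) ∧ 0 ≤ (x:Int) + off.1 ∧ (x:Int) + off.1 < 16)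
      ∧ m.testBit (15 - x) = true
  · simp only [writesOfs, List.filterMap_cons, if_pos h]
  · simp only [writesOfs, List.filterMap_cons, if_neg h]

theorem sim_off_fold (M0 : List Nat) (middle : String) (y x : Nat)
    (hy : y < M0.length) (hx : x < 16) :
    ∀ (offs : List (Int × Int)) (M : List Nat), M.length = M0.length →
    offs.foldl (fun new off =>
      if 0 ≤ (y : Int) + off.2 ∧ (y : Int) + off.2 < ((M0.map rowOf).length : Int)
          ∧ 0 ≤ (x : Int) + off.1 ∧ (x : Int) + off.1 < (16 : Int) then
        if PySem.List.pyGetD (rowOf (M0.getD y 0)) (x : Int) ' ' = '1' then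
          listAssign new ((y : Int) + off.2)
            (setCharAt (PySem.List.pyGetD new ((y : Int) + off.2) []) ((x : Int) + off.1) '1')
        else new
      else new) (M.map rowOf)
    = ((writesOfs M0.length offs (M0.getD y 0) y x).foldl orAt M).map rowOf := by
  have hread : (PySem.List.pyGetD (rowOf (M0.getD y 0)) (x:Int) ' ' = '1')
      ↔ (M0.getD y 0).testBit (15 - x) = true := by
    rw [PySem.List.pyGetD_natCast]
    exact rowOf_read _ x hx
  intro offs
  induction offs with
  | nil => intro M hM; rfl
  | cons off offs ih =>
    intro M hM
    rw [List.foldl_cons, writesOfs_cons]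
    have hlen2 : ((M0.map rowOf).length : Int) = (M0.length : Int) := by simp
    by_cases hc1 : 0 ≤ (y : Int) + off.2 ∧ (y : Int) + off.2 < ((M0.map rowOf).length : Int)
        ∧ 0 ≤ (x : Int) + off.1 ∧ (x : Int) + off.1 < (16 : Int)
    · rw [if_pos hc1]
      rw [hlen2] at hc1
      by_cases hbit : (M0.getD y 0).testBit (15 - x) = true
      · rw [if_pos (hread.mpr hbit), if_pos ⟨⟨hc1.1, hc1.2.1, hc1.2.2.1, hc1.2.2.2⟩, hbit⟩]
        rw [write_one M ((y:Int) + off.2) ((x:Int) + off.1) hc1.1 (by omega) hc1.2.2.1 (by omega)]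
        rw [List.foldl_cons]
        exact ih (orAt M _) (by rw [orAt, List.length_set, hM])
      · rw [if_neg (fun hr => hbit (hread.mp hr)),
            if_neg (fun hcc => hbit hcc.2)]
        exact ih M hM
    · rw [if_neg hc1, if_neg (fun hcc => hc1 ⟨hcc.1.1, by rw [hlen2]; exact hcc.1.2.1, hcc.1.2.2.1, hcc.1.2.2.2⟩)]
      exact ih M hM

theorem sim_x_fold (M0 : List Nat) (offsets : List (Int × Int)) (middle : String) (y : Nat)
    (hy : y < M0.length) :
    ∀ (xs : List Nat), (∀ x ∈ xs, x < 16) → ∀ (M : List Nat), M.length = M0.length →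
    xs.foldl (fun new (x : Nat) =>
      if middle = "filled" then
        if PySem.List.pyGetD (rowOf (M0.getD y 0)) (x : Int) ' ' = '1' then
          listAssign
            (offsets.foldl (fun new off =>
              if 0 ≤ (y : Int) + off.2 ∧ (y : Int) + off.2 < ((M0.map rowOf).length : Int)
                  ∧ 0 ≤ (x : Int) + off.1 ∧ (x : Int) + off.1 < 16 then
                if PySem.List.pyGetD (rowOf (M0.getD y 0)) (x : Int) ' ' = '1' then
                  listAssign new ((y : Int) + off.2)
                    (setCharAt (PySem.List.pyGetD new ((y : Int) + off.2) []) ((x : Int) + off.1) '1')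
                else new
              else new) new) (y : Int)
            (setCharAt (PySem.List.pyGetD
              (offsets.foldl (fun new off =>
                if 0 ≤ (y : Int) + off.2 ∧ (y : Int) + off.2 < ((M0.map rowOf).length : Int)
                    ∧ 0 ≤ (x : Int) + off.1 ∧ (x : Int) + off.1 < 16 then
                  if PySem.List.pyGetD (rowOf (M0.getD y 0)) (x : Int) ' ' = '1' then
                    listAssign new ((y : Int) + off.2)
                      (setCharAt (PySem.List.pyGetD new ((y : Int) + off.2) []) ((x : Int) + off.1) '1')
                  else new
                else new) new) (y : Int) [])
              (x : Int) '1')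
        else
          offsets.foldl (fun new off =>
            if 0 ≤ (y : Int) + off.2 ∧ (y : Int) + off.2 < ((M0.map rowOf).length : Int)
                ∧ 0 ≤ (x : Int) + off.1 ∧ (x : Int) + off.1 < 16 then
              if PySem.List.pyGetD (rowOf (M0.getD y 0)) (x : Int) ' ' = '1' then
                listAssign new ((y : Int) + off.2)
                  (setCharAt (PySem.List.pyGetD new ((y : Int) + off.2) []) ((x : Int) + off.1) '1')
              else new
            else new) new
      else
        offsets.foldl (fun new off =>
          if 0 ≤ (y : Int) + off.2 ∧ (y : Int) + off.2 < ((M0.map rowOf).length : Int)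
              ∧ 0 ≤ (x : Int) + off.1 ∧ (x : Int) + off.1 < 16 then
            if PySem.List.pyGetD (rowOf (M0.getD y 0)) (x : Int) ' ' = '1' then
              listAssign new ((y : Int) + off.2)
                (setCharAt (PySem.List.pyGetD new ((y : Int) + off.2) []) ((x : Int) + off.1) '1')
            else new
          else new) new) (M.map rowOf)
    = ((xs.flatMap (fun x => writesOfs M0.length offsets (M0.getD y 0) y x
          ++ filledW (middle == "filled") (M0.getD y 0) y x)).foldl orAt M).map rowOf := by
  intro xs
  induction xs with
  | nil => intro _ M hM; rfl
  | cons x xs ih =>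
    intro hxs M hM
    have hx : x < 16 := hxs x (by simp)
    rw [List.foldl_cons, List.flatMap_cons, List.foldl_append, List.foldl_append]
    have hoff := sim_off_fold M0 middle y x hy hx offsets M hM
    rw [hoff]
    set M1 := (writesOfs M0.length offsets (M0.getD y 0) y x).foldl orAt M with hM1
    have hM1len : M1.length = M0.length := by rw [hM1, foldl_orAt_length, hM]
    have hread : (PySem.List.pyGetD (rowOf (M0.getD y 0)) (x:Int) ' ' = '1')
        ↔ (M0.getD y 0).testBit (15 - x) = true := by
      rw [PySem.List.pyGetD_natCast]
      exact rowOf_read _ x hx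
    by_cases hmid : middle = "filled"
    · by_cases hbit : (M0.getD y 0).testBit (15 - x) = true
      · rw [if_pos hmid, if_pos (hread.mpr hbit)]
        rw [write_one M1 (y : Int) (x : Int) (by omega) (by simpa [hM1len]) (by omega) (by simpa)]
        rw [filledW, if_pos (by rw [hmid]; simp only [beq_self_eq_true, Bool.true_and]; exact hbit),
          List.foldl_cons, List.foldl_nil]
        refine ih (fun u hu => hxs u (by simp [hu])) (orAt M1 _) (by rw [orAt, List.length_set, hM1len])
          |>.trans ?_
        congr 2
      · rw [if_pos hmid, if_neg (fun hr => hbit (hread.mp hr))]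
        rw [filledW, if_neg (by simp only [Bool.and_eq_true]; rintro ⟨-, hbb⟩; exact hbit hbb),
          List.foldl_nil]
        exact ih (fun u hu => hxs u (by simp [hu])) M1 hM1len
    · rw [if_neg hmid]
      rw [filledW, if_neg (by simp [hmid]), List.foldl_nil]
      exact ih (fun u hu => hxs u (by simp [hu])) M1 hM1len

theorem sim_y_fold (M0 : List Nat) (offsets : List (Int × Int)) (middle : String) :
    ∀ (ys : List Nat), (∀ y ∈ ys, y < M0.length) → ∀ (M : List Nat), M.length = M0.length →
    ys.foldl (fun new (y : Nat) =>
      (List.range (PySem.List.pyGetD (M0.map rowOf) (y : Int) []).length).foldl (fun new (x : Nat) =>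
        if middle = "filled" then
          if PySem.List.pyGetD (PySem.List.pyGetD (M0.map rowOf) (y : Int) []) (x : Int) ' ' = '1' then
            listAssign
              (offsets.foldl (fun new off =>
                if 0 ≤ (y : Int) + off.2 ∧ (y : Int) + off.2 < ((M0.map rowOf).length : Int)
                    ∧ 0 ≤ (x : Int) + off.1
                    ∧ (x : Int) + off.1 < ((PySem.List.pyGetD (M0.map rowOf) (y : Int) []).length : Int) then
                  if PySem.List.pyGetD (PySem.List.pyGetD (M0.map rowOf) (y : Int) []) (x : Int) ' ' = '1' then
                    listAssign new ((y : Int) + off.2)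
                      (setCharAt (PySem.List.pyGetD new ((y : Int) + off.2) []) ((x : Int) + off.1) '1')
                  else new
                else new) new) (y : Int)
              (setCharAt (PySem.List.pyGetD
                (offsets.foldl (fun new off =>
                  if 0 ≤ (y : Int) + off.2 ∧ (y : Int) + off.2 < ((M0.map rowOf).length : Int)
                      ∧ 0 ≤ (x : Int) + off.1
                      ∧ (x : Int) + off.1 < ((PySem.List.pyGetD (M0.map rowOf) (y : Int) []).length : Int) then
                    if PySem.List.pyGetD (PySem.List.pyGetD (M0.map rowOf) (y : Int) []) (x : Int) ' ' = '1' then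
                      listAssign new ((y : Int) + off.2)
                        (setCharAt (PySem.List.pyGetD new ((y : Int) + off.2) []) ((x : Int) + off.1) '1')
                    else new
                  else new) new) (y : Int) [])
                (x : Int) '1')
          else
            offsets.foldl (fun new off =>
              if 0 ≤ (y : Int) + off.2 ∧ (y : Int) + off.2 < ((M0.map rowOf).length : Int)
                  ∧ 0 ≤ (x : Int) + off.1
                  ∧ (x : Int) + off.1 < ((PySem.List.pyGetD (M0.map rowOf) (y : Int) []).length : Int) then
                if PySem.List.pyGetD (PySem.List.pyGetD (M0.map rowOf) (y : Int) []) (x : Int) ' ' = '1' then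
                  listAssign new ((y : Int) + off.2)
                    (setCharAt (PySem.List.pyGetD new ((y : Int) + off.2) []) ((x : Int) + off.1) '1')
                else new
              else new) new
        else
          offsets.foldl (fun new off =>
            if 0 ≤ (y : Int) + off.2 ∧ (y : Int) + off.2 < ((M0.map rowOf).length : Int)
                ∧ 0 ≤ (x : Int) + off.1
                ∧ (x : Int) + off.1 < ((PySem.List.pyGetD (M0.map rowOf) (y : Int) []).length : Int) then
              if PySem.List.pyGetD (PySem.List.pyGetD (M0.map rowOf) (y : Int) []) (x : Int) ' ' = '1' then
                listAssign new ((y : Int) + off.2)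
                  (setCharAt (PySem.List.pyGetD new ((y : Int) + off.2) []) ((x : Int) + off.1) '1')
              else new
            else new) new) new) (M.map rowOf)
    = ((ys.flatMap (fun y => (List.range 16).flatMap (fun x =>
        writesOfs M0.length offsets (M0.getD y 0) y x
          ++ filledW (middle == "filled") (M0.getD y 0) y x))).foldl orAt M).map rowOf := by
  intro ys
  induction ys with
  | nil => intro _ M hM; rfl
  | cons y ys ih =>
    intro hys M hM
    have hy : y < M0.length := hys y (by simp)
    have hrow : PySem.List.pyGetD (M0.map rowOf) (y : Int) [] = rowOf (M0.getD y 0) := by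
      rw [PySem.List.pyGetD_natCast]
      exact getD_map_rowOf M0 y hy
    rw [List.foldl_cons, List.flatMap_cons, List.foldl_append]
    simp only [hrow, rowOf_length, Nat.cast_ofNat]
    rw [sim_x_fold M0 offsets middle y hy (List.range 16) (fun x hx => List.mem_range.mp hx) M hM]
    exact ih (fun u hu => hys u (by simp [hu]))
      (((List.range 16).flatMap (fun x => writesOfs M0.length offsets (M0.getD y 0) y x
        ++ filledW (middle == "filled") (M0.getD y 0) y x)).foldl orAt M)
      (by rw [foldl_orAt_length, hM])

theorem sim_hx_fold (M0 : List Nat) (y : Nat) (hy : y < M0.length) :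
    ∀ (xs : List Nat), (∀ x ∈ xs, x < 16) → ∀ (M : List Nat), M.length = M0.length →
    xs.foldl (fun new (x : Nat) =>
      if PySem.List.pyGetD (rowOf (M0.getD y 0)) (x : Int) ' ' = '1' then
        listAssign new (y : Int)
          (setCharAt (PySem.List.pyGetD new (y : Int) []) (x : Int) '0')
      else new) (M.map rowOf)
    = ((xs.flatMap (fun x => hollowW (M0.getD y 0) y x)).foldl andAt M).map rowOf := by
  intro xs
  induction xs with
  | nil => intro _ M hM; rfl
  | cons x xs ih =>
    intro hxs M hM
    have hx : x < 16 := hxs x (by simp)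
    have hread : (PySem.List.pyGetD (rowOf (M0.getD y 0)) (x:Int) ' ' = '1')
        ↔ (M0.getD y 0).testBit (15 - x) = true := by
      rw [PySem.List.pyGetD_natCast]
      exact rowOf_read _ x hx
    rw [List.foldl_cons, List.flatMap_cons, List.foldl_append]
    by_cases hbit : (M0.getD y 0).testBit (15 - x) = true
    · rw [if_pos (hread.mpr hbit)]
      rw [write_zero M (y : Int) (x : Int) (by omega) (by simpa [hM]) (by omega) (by simpa)]
      rw [hollowW, if_pos hbit, List.foldl_cons, List.foldl_nil]
      refine ih (fun u hu => hxs u (by simp [hu])) (andAt M _) (by rw [andAt, List.length_set, hM])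
        |>.trans ?_
      congr 2
    · rw [if_neg (fun hr => hbit (hread.mp hr))]
      rw [hollowW, if_neg hbit, List.foldl_nil]
      exact ih (fun u hu => hxs u (by simp [hu])) M hM

theorem sim_hy_fold (M0 : List Nat) :
    ∀ (ys : List Nat), (∀ y ∈ ys, y < M0.length) → ∀ (M : List Nat), M.length = M0.length →
    ys.foldl (fun new (y : Nat) =>
      (List.range (PySem.List.pyGetD (M0.map rowOf) (y : Int) []).length).foldl (fun new (x : Nat) =>
        if PySem.List.pyGetD (PySem.List.pyGetD (M0.map rowOf) (y : Int) []) (x : Int) ' ' = '1' then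
          listAssign new (y : Int)
            (setCharAt (PySem.List.pyGetD new (y : Int) []) (x : Int) '0')
        else new) new) (M.map rowOf)
    = ((ys.flatMap (fun y => (List.range 16).flatMap (fun x =>
        hollowW (M0.getD y 0) y x))).foldl andAt M).map rowOf := by
  intro ys
  induction ys with
  | nil => intro _ M hM; rfl
  | cons y ys ih =>
    intro hys M hM
    have hy : y < M0.length := hys y (by simp)
    have hrow : PySem.List.pyGetD (M0.map rowOf) (y : Int) [] = rowOf (M0.getD y 0) := by
      rw [PySem.List.pyGetD_natCast]
      exact getD_map_rowOf M0 y hy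
    rw [List.foldl_cons, List.flatMap_cons, List.foldl_append]
    simp only [hrow, rowOf_length]
    rw [sim_hx_fold M0 y hy (List.range 16) (fun x hx => List.mem_range.mp hx) M hM]
    exact ih (fun u hu => hys u (by simp [hu]))
      (((List.range 16).flatMap (fun x => hollowW (M0.getD y 0) y x)).foldl andAt M)
      (by rw [foldl_andAt_length, hM])

theorem simA (char : List Int) (offsets : List (Int × Int)) (middle : String)
    (h : Pre_offsetchar char offsets middle) :
    offsetchar char offsets middle =
      (phase2 (char.map Int.toNat) offsets middle).map (fun m => binToInt (rowOf m)) := by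
  have hbm : char.map to016b = (char.map Int.toNat).map rowOf := by
    rw [List.map_map]
    rfl
  set M0 := char.map Int.toNat with hM0
  simp only [offsetchar]
  rw [hbm]
  have h1 := sim_y_fold M0 offsets middle (List.range (M0.map rowOf).length)
    (fun y hy => by simpa using List.mem_range.mp hy) M0 rfl
  rw [h1]
  rw [show List.range (M0.map rowOf).length = List.range M0.length from by rw [List.length_map]]
  rw [← TW]
  by_cases hmid : middle = "hollow"
  · rw [if_pos hmid]
    have hp1len : (phase1 M0 offsets middle).length = M0.length := foldl_orAt_length _ _
    have h2 := sim_hy_fold M0 (List.range M0.length)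
      (fun y hy => List.mem_range.mp hy) (phase1 M0 offsets middle) hp1len
    rw [show (TW M0 offsets (middle == "filled")).foldl orAt M0 = phase1 M0 offsets middle from rfl]
    rw [h2, ← TH]
    rw [phase2, if_pos hmid, List.map_map]
    rfl
  · rw [if_neg hmid]
    rw [phase2, if_neg hmid, phase1, List.map_map]
    rfl

-- ---------- simulation: B's Int program computes the Nat model ----------

theorem simB (char : List Int) (offsets : List (Int × Int)) (middle : String)
    (h : Pre_offsetchar char offsets middle) :
    offsetchar_alt char offsets middle =
      (List.range char.length).map (fun y => ((bValN (char.map Int.toNat) offsets middle y : Nat) : Int)) := by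
  have hgetD : ∀ k : Nat, k < char.length →
      char.getD k 0 = (((char.map Int.toNat).getD k 0 : Nat) : Int) := by
    intro k hk
    rw [List.getD_eq_getElem _ _ hk, List.getD_eq_getElem _ _ (by simpa), List.getElem_map]
    exact (Int.toNat_of_nonneg (h _ (List.getElem_mem hk)).1).symm
  have hshift : ∀ (m : Nat) (dx : Int), shifted (m : Int) dx = ((shiftN m dx : Nat) : Int) := by
    intro m dx
    rw [shifted, shiftN]
    split_ifs
    · simp
    · rfl
    · exact_mod_cast PySem.Int.band_natCast (m <<< (-dx).toNat) 65535
  have hinner : ∀ y : Nat, y < char.length → ∀ a : Nat,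
      offsets.foldl (fun acc off =>
        if 0 ≤ (y : Int) - off.2 ∧ (y : Int) - off.2 < (char.length : Int) then
          PySem.Int.bor acc (shifted (PySem.List.pyGetD char ((y : Int) - off.2) 0) off.1)
        else acc) ((a : Nat) : Int)
      = ((offsets.foldl (fun acc off =>
          if 0 ≤ (y : Int) - off.2 ∧ (y : Int) - off.2 < (char.length : Int) then
            acc ||| shiftN ((char.map Int.toNat).getD ((y : Int) - off.2).toNat 0) off.1
          else acc) a : Nat) : Int) := by
    intro y hy
    clear hy
    induction offsets with
    | nil => intro a; rfl
    | cons off offs ih =>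
      intro a
      rw [List.foldl_cons, List.foldl_cons]
      split_ifs with hc
      · have hsrc : PySem.List.pyGetD char ((y : Int) - off.2) 0
            = (((char.map Int.toNat).getD ((y : Int) - off.2).toNat 0 : Nat) : Int) := by
          rw [PySem.List.pyGetD_of_nonneg char 0 hc.1]
          exact hgetD _ (by omega)
        rw [hsrc, hshift]
        rw [show PySem.Int.bor ((a : Nat) : Int) ((shiftN ((char.map Int.toNat).getD ((y:Int) - off.2).toNat 0) off.1 : Nat) : Int) = (((a ||| shiftN ((char.map Int.toNat).getD ((y:Int) - off.2).toNat 0) off.1 : Nat)) : Int) from by exact_mod_cast PySem.Int.bor_natCast _ _]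
        exact ih h (a ||| shiftN ((char.map Int.toNat).getD ((y : Int) - off.2).toNat 0) off.1)
      · exact ih h a
  have hmain : offsetchar_alt char offsets middle =
      (List.range char.length).map (fun (y : Nat) =>
        if middle = "hollow" then
          PySem.Int.band
            (offsets.foldl (fun acc off =>
              if 0 ≤ (y : Int) - off.2 ∧ (y : Int) - off.2 < (char.length : Int) then
                PySem.Int.bor acc (shifted (PySem.List.pyGetD char ((y : Int) - off.2) 0) off.1)
              else acc) (PySem.List.pyGetD char (y : Int) 0))
            (PySem.Int.bxor 65535 (PySem.List.pyGetD char (y : Int) 0))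
        else
          offsets.foldl (fun acc off =>
            if 0 ≤ (y : Int) - off.2 ∧ (y : Int) - off.2 < (char.length : Int) then
              PySem.Int.bor acc (shifted (PySem.List.pyGetD char ((y : Int) - off.2) 0) off.1)
            else acc) (PySem.List.pyGetD char (y : Int) 0)) := by
    show (List.range char.length).foldl (fun out (y : Nat) => out ++ [_]) [] = _
    simpa using PySem.List.foldl_append_singleton_eq_map _ (List.range char.length) ([] : List Int)
  rw [hmain]
  apply List.map_congr_left
  intro y hy
  have hy' : y < char.length := List.mem_range.mp hy
  have hbase : PySem.List.pyGetD char (y : Int) 0 = (((char.map Int.toNat).getD y 0 : Nat) : Int) := by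
    rw [PySem.List.pyGetD_natCast]
    exact hgetD y hy'
  rw [hbase, hinner y hy' _]
  rw [bValN, bRowN]
  simp only [List.length_map]
  split_ifs with hmid
  · rw [show PySem.Int.bxor 65535 (((char.map Int.toNat).getD y 0 : Nat) : Int)
        = ((65535 ^^^ (char.map Int.toNat).getD y 0 : Nat) : Int) from by
      exact_mod_cast PySem.Int.bxor_natCast 65535 _]
    exact_mod_cast PySem.Int.band_natCast _ _
  · rfl

-- ===== VERDICT (by name: the statement is the Claim_ definition above) =====
theorem offsetchar_spec : Claim_equal_offsetchar := by
  intro char offsets middle _hDom hPre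
  unfold Spec_offsetchar
  rw [simA char offsets middle hPre, simB char offsets middle hPre]
  set M0 := char.map Int.toNat with hM0def
  have hM0 : ∀ m ∈ M0, m < 65536 := by
    intro m hm
    rcases List.mem_map.mp hm with ⟨v, hv, rfl⟩
    have := hPre v hv; omega
  apply List.ext_getElem
  · simp only [phase2, phase1, List.length_map, List.length_range]
    split <;> simp [foldl_andAt_length, foldl_orAt_length, hM0def]
  · intro j h1 h2
    have hlen : (phase2 M0 offsets middle).length = M0.length := by
      simp only [phase2, phase1]
      split <;> simp [foldl_andAt_length, foldl_orAt_length]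
    have hj : j < M0.length := by simpa [hlen] using h1
    have hj' : j < char.length := by simpa [hM0def] using hj
    rw [List.getElem_map, List.getElem_map, List.getElem_range]
    rw [← List.getD_eq_getElem _ 0 (by omega)]
    rw [core_eq M0 offsets middle hM0 j hj]
    exact binToInt_rowOf _ (bValN_lt M0 offsets middle hM0 j hj)
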